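-- pv_equiv track=rewrite | github.com/jhs851/algorithm | programmers/2020_kakao_blind_recruitment/is_correct_parentheses.py | solution
-- ===== SOURCE A (Python) =====
-- from collections import deque
--
-- def is_correct_parentheses(w):
--     stack = []
--
--     for char in w:
--         if char == '(':
--             stack.append(True)
--         else:
--             if stack:
--                 stack.pop()
--
--     return len(stack) == 0
--
-- def reverse_parentheses(w):
--     reverse = ""
--
--     for char in w:
--         if char == '(':
--             reverse += ')'
--         else:
--             reverse += '('
--
--     return reverse
--
-- def solution(p):
--     if p == "":
--         return ""
--
--     queue = deque(p)
--     u, v = "", ""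
--     left, right = 0, 0
--
--     for char in p:
--         if char == '(':
--             left += 1
--         else:
--             right += 1
--
--         u += queue.popleft()
--
--         if left == right:
--             v = ''.join(queue)
--             break
--
--     if is_correct_parentheses(u):
--         return u + solution(v)
--     else:
--         return "(" + solution(v) + ")" + reverse_parentheses(u[1: -1])
-- ===== SOURCE B (Python) =====
-- from collections import deque
--
-- def _balanced(w):
--     depth = 0
--     for c in w:
--         if c == '(':
--             depth += 1
--         elif depth > 0:
--             depth -= 1
--     return depth == 0
--
-- def solution(p):
--     # One pass: cut p into minimal blocks whose '(' / other counts balance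
--     # (a trailing never-balancing remainder is the last block).
--     blocks = []
--     cur = []
--     bal = 0
--     for c in p:
--         cur.append(c)
--         bal += 1 if c == '(' else -1
--         if bal == 0:
--             blocks.append(''.join(cur))
--             cur = []
--     if cur:
--         blocks.append(''.join(cur))
--     # Fold back-to-front, keeping the result as deque fragments (O(n) total).
--     parts = deque()
--     for b in reversed(blocks):
--         if _balanced(b):
--             parts.appendleft(b)
--         else:
--             parts.appendleft("(")
--             parts.append(")" + ''.join(')' if c == '(' else '(' for c in b[1:-1]))
--     return ''.join(parts)
-- ===== Notes on version B (the rewrite author's own statement) =====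
-- stated objective: alternative
-- what changed: B replaces A's recursion (which rebuilds a deque of the remaining string and concatenates strings at each level) by a single linear pass that cuts p into minimal balanced blocks, then one back-to-front fold over the blocks accumulating deque fragments joined once at the end.
import Mathlib
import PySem

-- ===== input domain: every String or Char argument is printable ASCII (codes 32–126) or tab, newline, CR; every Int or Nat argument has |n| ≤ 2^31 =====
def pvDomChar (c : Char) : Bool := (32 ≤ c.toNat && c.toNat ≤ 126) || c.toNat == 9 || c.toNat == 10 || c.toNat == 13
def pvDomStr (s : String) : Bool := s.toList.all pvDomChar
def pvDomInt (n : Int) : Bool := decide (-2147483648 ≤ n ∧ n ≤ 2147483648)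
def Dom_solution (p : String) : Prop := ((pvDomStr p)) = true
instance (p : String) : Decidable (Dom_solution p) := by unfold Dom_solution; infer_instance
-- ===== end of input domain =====

-- B replaces A's recursive deque-rebuilding transform by a single-pass split into
-- minimal balanced blocks folded back-to-front into deque fragments (alternative algorithm).

-- ===== PORT A =====
-- is_correct_parentheses: stack of True values, pop only when nonempty
def isCorrectA (w : List Char) : Bool :=
  (w.foldl (fun (stack : List Bool) c =>
      if c = '(' then stack ++ [true]
      else if stack = [] then stack else stack.dropLast) []).length == 0

-- reverse_parentheses: string built by repeated +=
def revParA (w : List Char) : List Char :=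
  w.foldl (fun acc c => acc ++ [if c = '(' then ')' else '(']) []

-- the for-loop of A: counts left/right, moves chars from the queue into u,
-- breaks when left == right; returns (u, remaining queue)
def splitA : List Char → Int → Int → List Char → List Char × List Char
  | [], _, _, u => (u, [])
  | c :: rest, left, right, u =>
    let left' := if c = '(' then left + 1 else left
    let right' := if c = '(' then right else right + 1
    if left' = right' then (u ++ [c], rest)
    else splitA rest left' right' (u ++ [c])

theorem splitA_snd_lt : ∀ (l : List Char) (left right : Int) (acc : List Char),
    l ≠ [] → (splitA l left right acc).2.length < l.length := by
  intro l
  induction l with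
  | nil => intro _ _ _ h; exact absurd rfl h
  | cons c rest ih =>
    intro left right acc _
    simp only [splitA]
    by_cases h1 : (if c = '(' then left + 1 else left) = (if c = '(' then right else right + 1)
    · rw [if_pos h1]; simp
    · rw [if_neg h1]
      by_cases hr : rest = []
      · subst hr; simp [splitA]
      · exact Nat.lt_trans (ih _ _ _ hr) (by simp)

-- u[1:-1] is ported as (u.drop 1).dropLast, exact for every list (empty for len ≤ 1)
def solutionL (l : List Char) : List Char :=
  if h : l = [] then []
  else
    let uv := splitA l 0 0 []
    if isCorrectA uv.1 then uv.1 ++ solutionL uv.2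
    else '(' :: (solutionL uv.2 ++ ')' :: revParA ((uv.1.drop 1).dropLast))
termination_by l.length
decreasing_by all_goals exact splitA_snd_lt l 0 0 [] h

def solution (p : String) : String := String.ofList (solutionL p.toList)

-- ===== PORT B =====
-- _balanced: clamped depth counter
def balancedB (w : List Char) : Bool :=
  (w.foldl (fun (depth : Nat) c =>
      if c = '(' then depth + 1 else if depth > 0 then depth - 1 else depth) 0) == 0

-- single pass cutting p into blocks whenever the running balance hits 0;
-- a trailing never-balancing remainder becomes the last block
def blocksB : List Char → Int → List Char → List (List Char)
  | [], _, cur => if cur = [] then [] else [cur]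
  | c :: rest, bal, cur =>
    let bal' := if c = '(' then bal + 1 else bal - 1
    if bal' = 0 then (cur ++ [c]) :: blocksB rest 0 []
    else blocksB rest bal' (cur ++ [c])

def flipPar (c : Char) : Char := if c = '(' then ')' else '('

-- back-to-front fold over the blocks; the deque of fragments is a List (List Char)
-- (appendleft = cons, append = ++ [·]); ''.join = flatten
def solution_altL (l : List Char) : List Char :=
  ((blocksB l 0 []).reverse.foldl (fun (parts : List (List Char)) b =>
      if balancedB b then b :: parts
      else ['('] :: (parts ++ [')' :: ((b.drop 1).dropLast.map flipPar)])) []).flatten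

def solution_alt (p : String) : String := String.ofList (solution_altL p.toList)

-- ===== PRECONDITION & SPEC =====
def Spec_solution (p : String) (out : String) : Prop := out = solution_alt p
instance (p : String) (out : String) : Decidable (Spec_solution p out) := by unfold Spec_solution; infer_instance

-- ===== CLAIM (what is proved, stated in full; the proofs are below) =====
def Claim_equal_solution : Prop := ∀ (p : String), Dom_solution p → Spec_solution p (solution p)

-- ===== LEMMAS AND PROOFS =====

-- A's stack-of-booleans check has the same result as B's clamped counter
theorem stack_len : ∀ (w : List Char) (st : List Bool),
    (w.foldl (fun (stack : List Bool) c =>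
      if c = '(' then stack ++ [true]
      else if stack = [] then stack else stack.dropLast) st).length
    = w.foldl (fun (depth : Nat) c =>
      if c = '(' then depth + 1 else if depth > 0 then depth - 1 else depth) st.length := by
  intro w
  induction w with
  | nil => intro st; rfl
  | cons c rest ih =>
    intro st
    simp only [List.foldl_cons]
    by_cases hc : c = '('
    · simp [hc, ih]
    · by_cases hst : st = ([] : List Bool)
      · simpa [hc, hst] using ih []
      · have hpos : 0 < st.length := List.length_pos_iff.mpr hst
        rw [if_neg hc, if_neg hst, if_neg hc, if_pos hpos, ih,
            List.length_dropLast]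

theorem correct_eq (w : List Char) : isCorrectA w = balancedB w := by
  unfold isCorrectA balancedB
  rw [stack_len w []]
  rfl

theorem revParA_eq_map : ∀ (w acc : List Char),
    w.foldl (fun acc c => acc ++ [if c = '(' then ')' else '(']) acc
      = acc ++ w.map flipPar := by
  intro w
  induction w with
  | nil => intro acc; simp
  | cons c rest ih => intro acc; simp [flipPar, ih]

theorem revParA_map (w : List Char) : revParA w = w.map flipPar := by
  unfold revParA
  simpa using revParA_eq_map w []

-- B's one-pass block scan produces A's (u, v) split, block by block
theorem blocks_split : ∀ (l : List Char) (left right : Int) (acc : List Char),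
    blocksB l (left - right) acc =
      if l = [] ∧ acc = [] then []
      else (splitA l left right acc).1 :: blocksB (splitA l left right acc).2 0 [] := by
  intro l
  induction l with
  | nil =>
    intro left right acc
    by_cases h : acc = [] <;> simp [blocksB, splitA, h]
  | cons c rest ih =>
    intro left right acc
    simp only [blocksB, splitA]
    by_cases hc : c = '('
    · have hb : (if c = '(' then left - right + 1 else left - right - 1)
          = (if c = '(' then left + 1 else left) - (if c = '(' then right else right + 1) := by
        simp [hc]; omega
      rw [hb]
      by_cases hz : (if c = '(' then left + 1 else left) = (if c = '(' then right else right + 1)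
      · rw [if_pos (by omega), if_pos hz]
        simp
      · rw [if_neg (by omega), if_neg hz]
        have := ih (if c = '(' then left + 1 else left)
          (if c = '(' then right else right + 1) (acc ++ [c])
        rw [this, if_neg (by simp)]
        simp
    · have hb : (if c = '(' then left - right + 1 else left - right - 1)
          = (if c = '(' then left + 1 else left) - (if c = '(' then right else right + 1) := by
        simp [hc]; omega
      rw [hb]
      by_cases hz : (if c = '(' then left + 1 else left) = (if c = '(' then right else right + 1)
      · rw [if_pos (by omega), if_pos hz]
        simp
      · rw [if_neg (by omega), if_neg hz]
        have := ih (if c = '(' then left + 1 else left)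
          (if c = '(' then right else right + 1) (acc ++ [c])
        rw [this, if_neg (by simp)]
        simp

-- the step B's fold performs on each block, phrased on the joined result
def stepR (b res : List Char) : List Char :=
  if isCorrectA b then b ++ res
  else '(' :: (res ++ ')' :: revParA ((b.drop 1).dropLast))

theorem altL_foldr (l : List Char) :
    solution_altL l = (blocksB l 0 []).foldr stepR [] := by
  unfold solution_altL
  rw [List.foldl_reverse]
  induction blocksB l 0 [] with
  | nil => rfl
  | cons b bs ih =>
    simp only [List.foldr_cons]
    by_cases hb : balancedB b = true
    · rw [if_pos hb]
      simp only [List.flatten_cons, ih, stepR, correct_eq, hb, if_pos]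
    · rw [if_neg hb]
      simp only [List.flatten_cons, List.flatten_append, List.flatten_nil,
        List.append_nil, List.singleton_append]
      rw [ih]
      simp [stepR, correct_eq, hb, revParA_map]

theorem mainL : ∀ (n : Nat) (l : List Char), l.length ≤ n →
    solutionL l = (blocksB l 0 []).foldr stepR [] := by
  intro n
  induction n with
  | zero =>
    intro l hl
    have : l = [] := List.eq_nil_of_length_eq_zero (Nat.le_zero.mp hl)
    subst this
    simp [solutionL, blocksB]
  | succ n ih =>
    intro l hl
    by_cases h : l = []
    · subst h; simp [solutionL, blocksB]
    · have hsplit : blocksB l 0 [] =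
          (splitA l 0 0 []).1 :: blocksB (splitA l 0 0 []).2 0 [] := by
        have := blocks_split l 0 0 []
        simpa [h] using this
      have hlt := splitA_snd_lt l 0 0 [] h
      have hrec := ih (splitA l 0 0 []).2 (by omega)
      rw [hsplit, List.foldr_cons, ← hrec]
      rw [solutionL]
      rw [dif_neg h]
      unfold stepR
      by_cases hc : isCorrectA (splitA l 0 0 []).1 = true
      · rw [if_pos hc]
      · rw [if_neg hc]

-- ===== VERDICT (by name: the statement is the Claim_ definition above) =====
theorem solution_spec : Claim_equal_solution := by
  intro p _
  unfold Spec_solution solution solution_alt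
  rw [mainL p.toList.length p.toList le_rfl, altL_foldr]
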